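-- pv_equiv track=rewrite | github.com/qazwsxedc121/lex_mint | src/llm_runtime/context_planner.py | _truncate_messages_by_rounds
-- ===== SOURCE A (Python) =====
-- from typing import Any
--
-- def _truncate_messages_by_rounds(
--     messages: list[dict[str, Any]], max_rounds: int | None
-- ) -> list[dict[str, Any]]:
--     if not max_rounds or max_rounds <= 0:
--         return list(messages)
--
--     human_indexes = [index for index, msg in enumerate(messages) if msg.get("role") == "user"]
--     if len(human_indexes) <= max_rounds:
--         return list(messages)
--
--     start_index = human_indexes[-max_rounds]
--     return list(messages[start_index:])
-- ===== SOURCE B (Python) =====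
-- def _truncate_messages_by_rounds(messages, max_rounds):
--     if not max_rounds or max_rounds <= 0:
--         return list(messages)
--     count = 0
--     start = len(messages)
--     for i in range(len(messages) - 1, -1, -1):
--         if messages[i].get("role") == "user":
--             count += 1
--             if count > max_rounds:
--                 return messages[start:]
--             start = i
--     return list(messages)
-- ===== Notes on version B (the rewrite author's own statement) =====
-- stated objective: alternative
-- what changed: Instead of materialising the full list of user-message indices and doing a negative-index lookup, B scans from the end with a single counter and a remembered start position, stopping as soon as the (max_rounds+1)-th user message from the end is found.
import Mathlib
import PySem

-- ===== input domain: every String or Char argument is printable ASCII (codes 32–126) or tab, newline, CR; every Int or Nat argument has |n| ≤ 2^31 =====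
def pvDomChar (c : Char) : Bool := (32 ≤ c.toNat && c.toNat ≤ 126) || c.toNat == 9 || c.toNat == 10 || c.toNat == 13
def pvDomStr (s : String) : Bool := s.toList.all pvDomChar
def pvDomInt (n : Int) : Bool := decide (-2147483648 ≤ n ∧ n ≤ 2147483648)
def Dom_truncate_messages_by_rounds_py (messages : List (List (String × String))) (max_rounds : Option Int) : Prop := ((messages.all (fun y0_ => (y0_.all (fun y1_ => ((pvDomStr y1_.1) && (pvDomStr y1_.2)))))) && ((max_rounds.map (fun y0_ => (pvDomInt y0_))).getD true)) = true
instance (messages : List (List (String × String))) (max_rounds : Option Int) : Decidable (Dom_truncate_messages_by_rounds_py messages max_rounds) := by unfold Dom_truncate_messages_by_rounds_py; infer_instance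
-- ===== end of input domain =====

-- B replaces A's materialised index list + negative-index lookup by a single backward scan with a
-- counter and a remembered start position (objective: alternative decomposition, early exit).

-- shared transliteration of Python's  msg.get("role") == "user"  (appears verbatim in both sources)
def pvIsUser (msg : List (String × String)) : Bool :=
  (PySem.Dict.mk msg).get? "role" == some "user"

-- ===== PORT A =====
def truncate_messages_by_rounds_py (messages : List (List (String × String))) (max_rounds : Option Int) : List (List (String × String)) :=
  match max_rounds with
  | none => messages                 -- `not max_rounds` is true for None
  | some r =>
    if r ≤ 0 then messages           -- `not r or r <= 0` ≡ r ≤ 0 for an int r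
    else
      let human_indexes : List Int :=
        ((PySem.List.enumerate messages).filter (fun p => pvIsUser p.2)).map (·.1)
      if (human_indexes.length : Int) ≤ r then messages
      else
        match PySem.List.pyGet? human_indexes (-r) with
        | some start_index => PySem.List.slice messages (some start_index) none
        | none => []                 -- unreachable: r < len(human_indexes) makes -r a valid index

-- ===== PORT B =====
-- the `for i in range(len(messages)-1, -1, -1)` loop of Source B, carrying (count, start)
def tmbrGo (messages : List (List (String × String))) (r : Int) :
    List Int → Int → Int → List (List (String × String))
  | [], _, _ => messages
  | i :: rest, count, start =>
    -- messages[i]: i comes from range(len-1, -1, -1), always in range, so the default is never used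
    if pvIsUser (PySem.List.pyGetD messages i []) then
      if r < count + 1 then PySem.List.slice messages (some start) none
      else tmbrGo messages r rest (count + 1) i
    else tmbrGo messages r rest count start

def truncate_messages_by_rounds_py_alt (messages : List (List (String × String))) (max_rounds : Option Int) : List (List (String × String)) :=
  match max_rounds with
  | none => messages
  | some r =>
    if r ≤ 0 then messages
    else tmbrGo messages r (PySem.List.pyRange ((messages.length : Int) - 1) (-1) (-1)) 0 (messages.length : Int)

-- ===== PRECONDITION & SPEC =====
def Spec_truncate_messages_by_rounds_py (messages : List (List (String × String))) (max_rounds : Option Int) (out : List (List (String × String))) : Prop := out = truncate_messages_by_rounds_py_alt messages max_rounds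
instance (messages : List (List (String × String))) (max_rounds : Option Int) (out : List (List (String × String))) : Decidable (Spec_truncate_messages_by_rounds_py messages max_rounds out) := by unfold Spec_truncate_messages_by_rounds_py; infer_instance

-- ===== CLAIM (what is proved, stated in full; the proofs are below) =====
def Claim_equal_truncate_messages_by_rounds_py : Prop := ∀ (messages : List (List (String × String))) (max_rounds : Option Int), Dom_truncate_messages_by_rounds_py messages max_rounds → Spec_truncate_messages_by_rounds_py messages max_rounds (truncate_messages_by_rounds_py messages max_rounds)

-- ===== LEMMAS AND PROOFS =====

-- ascending list of user-message indices among the first k messages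
def pvUB (msgs : List (List (String × String))) (k : Nat) : List Int :=
  ((List.range k).filter (fun j => pvIsUser (msgs.getD j []))).map (fun j => Int.ofNat j)

lemma pvUB_succ (msgs : List (List (String × String))) (k : Nat) :
    pvUB msgs (k + 1) =
      pvUB msgs k ++ (if pvIsUser (msgs.getD k []) then [(Int.ofNat k)] else []) := by
  by_cases h : pvIsUser (msgs.getD k []) = true <;>
    simp only [List.getD] at h <;>
    simp [pvUB, List.range_succ, List.filter_append, h]

lemma tmbrGo_spec (msgs : List (List (String × String))) (r : Int) (k : Nat) :
    ∀ (c s : Int), 0 ≤ c → c ≤ r →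
    tmbrGo msgs r (PySem.List.pyRange ((k : Int) - 1) (-1) (-1)) c s =
      if ((pvUB msgs k).length : Int) + c ≤ r then msgs
      else if c = r then PySem.List.slice msgs (some s) none
      else PySem.List.slice msgs
            (some ((pvUB msgs k).getD ((pvUB msgs k).length - (r - c).toNat) 0)) none := by
  induction k with
  | zero =>
    intro c s hc hcr
    rw [PySem.List.pyRange_neg_one_eq_nil (by norm_num)]
    simp [tmbrGo, pvUB]
    omega
  | succ k ih =>
    intro c s hc hcr
    have hcast : (((k + 1 : Nat) : Int) - 1) = (k : Int) := by push_cast; ring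
    rw [hcast, PySem.List.pyRange_neg_one_cons (by omega)]
    rw [show tmbrGo msgs r ((k : Int) :: PySem.List.pyRange ((k : Int) - 1) (-1) (-1)) c s =
        if pvIsUser (PySem.List.pyGetD msgs (k : Int) []) then
          if r < c + 1 then PySem.List.slice msgs (some s) none
          else tmbrGo msgs r (PySem.List.pyRange ((k : Int) - 1) (-1) (-1)) (c + 1) (k : Int)
        else tmbrGo msgs r (PySem.List.pyRange ((k : Int) - 1) (-1) (-1)) c s from rfl]
    rw [pvUB_succ, PySem.List.pyGetD_natCast]
    have hL : ∀ t : List Int, (pvUB msgs k ++ t).length = (pvUB msgs k).length + t.length := by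
      simp
    by_cases hu : pvIsUser (msgs.getD k []) = true
    · rw [if_pos hu, if_pos hu]
      have hlen : (pvUB msgs k ++ [Int.ofNat k]).length = (pvUB msgs k).length + 1 := by simp
      by_cases hr : r < c + 1
      · -- count would exceed max_rounds: return the remembered slice; c = r here
        rw [if_pos hr]
        rw [if_neg (show ¬ (((pvUB msgs k ++ [Int.ofNat k]).length : Int) + c ≤ r) by
              rw [hlen]; push_cast; omega),
            if_pos (show c = r by omega)]
      · rw [if_neg hr, ih (c + 1) (k : Int) (by omega) (by omega)]
        by_cases h1 : ((pvUB msgs k).length : Int) + (c + 1) ≤ r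
        · rw [if_pos h1,
              if_pos (show ((pvUB msgs k ++ [Int.ofNat k]).length : Int) + c ≤ r by
                rw [hlen]; push_cast; omega)]
        · rw [if_neg h1,
              if_neg (show ¬ (((pvUB msgs k ++ [Int.ofNat k]).length : Int) + c ≤ r) by
                rw [hlen]; push_cast; omega),
              if_neg (show ¬ c = r by omega)]
          by_cases h2 : c + 1 = r
          · rw [if_pos h2]
            have hpos : (pvUB msgs k ++ [Int.ofNat k]).length - (r - c).toNat
                = (pvUB msgs k).length := by rw [hlen]; omega
            rw [hpos, List.getD_append_right _ _ _ _ (le_refl _)]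
            simp
          · rw [if_neg h2]
            have hlt : (pvUB msgs k).length - (r - (c + 1)).toNat
                < (pvUB msgs k).length := by omega
            have hpos : (pvUB msgs k ++ [Int.ofNat k]).length - (r - c).toNat
                = (pvUB msgs k).length - (r - (c + 1)).toNat := by rw [hlen]; omega
            rw [hpos, List.getD_append _ _ _ _ hlt]
    · rw [if_neg hu, if_neg hu, ih c s hc hcr]
      simp

lemma enum_filter_eq (msgs : List (List (String × String))) : ∀ (s : Int),
    ((PySem.List.enumerate msgs s).filter (fun p => pvIsUser p.2)).map (·.1)
      = ((List.range msgs.length).filter (fun j => pvIsUser (msgs.getD j []))).map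
          (fun j => s + Int.ofNat j) := by
  induction msgs with
  | nil => intro s; simp [PySem.List.enumerate]
  | cons x xs ih =>
    intro s
    rw [PySem.List.enumerate_cons]
    rw [List.length_cons, List.range_succ_eq_map]
    rw [List.filter_cons, List.filter_cons, List.filter_map]
    by_cases hu : pvIsUser x = true
    · simp only [hu, List.getD_cons_zero, if_pos]
      rw [List.map_cons, List.map_cons, List.map_map, ih (s + 1)]
      congr 1
      · simp
      · simp only [Function.comp_def, List.getD_cons_succ]
        apply List.map_congr_left
        intro j _
        simp only [Int.ofNat_eq_natCast, Nat.succ_eq_add_one]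
        push_cast
        ring
    · simp only [hu, List.getD_cons_zero, Bool.false_eq_true, if_false]
      rw [List.map_map, ih (s + 1)]
      simp only [Function.comp_def, List.getD_cons_succ]
      apply List.map_congr_left
      intro j _
      simp only [Int.ofNat_eq_natCast, Nat.succ_eq_add_one]
      push_cast
      ring

-- ===== VERDICT (by name: the statement is the Claim_ definition above) =====
theorem truncate_messages_by_rounds_py_spec : Claim_equal_truncate_messages_by_rounds_py := by
  intro messages max_rounds _
  unfold Spec_truncate_messages_by_rounds_py
  unfold truncate_messages_by_rounds_py truncate_messages_by_rounds_py_alt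
  cases max_rounds with
  | none => rfl
  | some r =>
    by_cases hr : r ≤ 0
    · simp [hr]
    · simp only [if_neg hr]
      have hH : ((PySem.List.enumerate messages).filter (fun p => pvIsUser p.2)).map (·.1)
          = pvUB messages messages.length := by
        rw [show PySem.List.enumerate messages = PySem.List.enumerate messages 0 from rfl]
        rw [enum_filter_eq messages 0]
        unfold pvUB
        apply List.map_congr_left
        intro j _
        simp
      rw [tmbrGo_spec messages r messages.length 0 (messages.length : Int) le_rfl (by omega)]
      rw [hH]
      by_cases hle : ((pvUB messages messages.length).length : Int) ≤ r
      · rw [if_pos hle, if_pos (by omega)]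
      · rw [if_neg hle, if_neg (by omega), if_neg (show ¬ (0 : Int) = r by omega)]
        set H := pvUB messages messages.length with hHdef
        have hget : PySem.List.pyGet? H (-r) = some (H.getD (H.length - r.toNat) 0) := by
          have h1 : -r = -((r.toNat : Nat) : Int) := by omega
          rw [h1, PySem.List.pyGet?_neg_natCast H r.toNat (by omega) (by omega)]
          rw [List.getElem?_eq_getElem (by omega), List.getD_eq_getElem _ _ (by omega)]
        rw [hget]
        simp
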